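-- pv_equiv track=rewrite | github.com/Christian-Andersen/project-euler | done/p88.py | get_smallest_N
-- ===== SOURCE A (Python) =====
-- from math import prod
--
-- def up_factor(factors: set[tuple]) -> set[tuple]:
--     # all tuples must be same length
--     length = len(next(iter(factors)))
--     for factor in factors:
--         assert len(factor) == length
--     new_factors = set()
--     for factor in factors:
--         for i in range(1, length):
--             for j in range(i):
--                 multiplied = [factor[i] * factor[j]]
--                 rest = [factor[k] for k in range(length) if ((k != i) and (k != j))]
--                 new_factors.add(tuple(sorted(multiplied + rest)))
--     return new_factors
--
-- def factorize(x: int) -> tuple[int]: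
--     if x == 1:
--         return tuple()
--     for i in range(2, x + 1):
--         div, mod = divmod(x, i)
--         if mod == 0:
--             return (i,) + factorize(div)
--
-- def get_smallest_N(k):
--     N = k
--     while True:
--         factors_set = set()
--         factors_set.add(factorize(N))
--         while True:
--             for factors in factors_set:
--                 lhs = prod(factors)
--                 rhs = sum(factors) + (k - len(factors))
--                 if lhs == rhs:
--                     return N
--             factors_set = up_factor(factors_set)
--             if not factors_set:
--                 break
--         N += 1
--     return N
-- ===== SOURCE B (Python) =====
-- def get_smallest_N(k):
--     N = k
--     while not _search(N, 2, N - k):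
--         N += 1
--     return N
--
-- def _search(m, f, d):
--     # True iff m is a product of nondecreasing factors, all >= f,
--     # whose (sum - count) equals d.  (Empty product allowed: m == 1.)
--     if m == 1:
--         return d == 0
--     if d == m - 1 and m >= f:      # m itself as the single remaining factor
--         return True
--     a = f
--     while a * a <= m:              # a smallest factor of a multi-factor split
--         if m % a == 0 and _search(m // a, a, d - (a - 1)):
--             return True
--         a += 1
--     return False
-- ===== Notes on version B (the rewrite author's own statement) =====
-- stated objective: faster
-- what changed: Instead of regenerating, for every candidate N, the set of all factor multisets of N by repeatedly merging pairs of tuple entries (up_factor BFS over sets of sorted tuples, starting from the prime factorization), B tests each candidate N with a direct recursive bounded-divisor search (smallest factor scanned only up to sqrt of the remaining product) for a single product-sum representation.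
import Mathlib
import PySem

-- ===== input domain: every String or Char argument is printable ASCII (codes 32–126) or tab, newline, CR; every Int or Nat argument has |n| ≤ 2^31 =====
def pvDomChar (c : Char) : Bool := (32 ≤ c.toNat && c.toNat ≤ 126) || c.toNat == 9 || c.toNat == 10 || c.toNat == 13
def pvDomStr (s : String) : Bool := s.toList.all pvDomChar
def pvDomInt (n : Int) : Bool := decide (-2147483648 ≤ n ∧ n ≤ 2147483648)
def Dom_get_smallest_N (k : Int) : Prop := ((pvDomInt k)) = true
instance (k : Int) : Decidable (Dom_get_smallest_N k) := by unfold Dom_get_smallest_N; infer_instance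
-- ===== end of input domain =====

-- B replaces A's per-N regeneration of every factor multiset (repeated pairwise set
-- merging from the prime factorization) by a direct recursive bounded-divisor search
-- for one product-sum split; measured much faster.  Return value only; no mutation.

-- ===== PORT A =====

-- factorize(x): trial division, smallest divisor first.  For x ≤ 0 Python falls off the
-- loop and returns None (get_smallest_N then raises; those k are outside Pre_); the port
-- returns [] there — it is exact for every x ≥ 1, the only arguments reached under Pre_.
def factorize (x : Int) : List Int :=
  if x = 1 then []
  else
    match h : (PySem.List.pyRange 2 (x + 1) 1).find? (fun i => PySem.Int.mod x i == 0) with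
    | some i => i :: factorize (PySem.Int.floordiv x i)
    | none => []
termination_by x.toNat
decreasing_by
  have hmem := List.mem_of_find?_eq_some h
  have hp := List.find?_some h
  rw [PySem.List.mem_pyRange_one] at hmem
  have hdvd : i ∣ x := by
    have := (PySem.Int.mod_eq_zero_iff_dvd x i).mp (by simpa using hp)
    exact this
  have h2 : (2:Int) ≤ i := hmem.1
  have hx2 : (2:Int) ≤ x := by
    rcases hdvd with ⟨c, rfl⟩
    have hi : i < i * c + 1 := hmem.2
    nlinarith
  rw [PySem.Int.floordiv_eq_ediv_of_pos (by omega)]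
  have hlt : x / i < x := by
    rw [Int.ediv_lt_iff_lt_mul (by omega)]
    nlinarith
  have hge : 0 ≤ x / i := Int.ediv_nonneg (by omega) (by omega)
  omega

-- up_factor: merge every pair of entries of every tuple in the set.
-- `length = len(next(iter(factors)))`: Python asserts that all tuples have equal length,
-- so the head's length is independent of the set's iteration order (exact).
def up_factor (factors : PySem.Set (List Int)) : PySem.Set (List Int) :=
  let length : Int := ((factors.headD []).length : Int)
  factors.foldl (fun acc factor =>
    (PySem.List.pyRange 1 length 1).foldl (fun acc i =>
      (PySem.List.pyRange 0 i 1).foldl (fun acc j =>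
        let multiplied := [PySem.List.pyGetD factor i 0 * PySem.List.pyGetD factor j 0]
        let rest := ((PySem.List.pyRange 0 length 1).filter
            (fun t => !(t == i) && !(t == j))).map (fun t => PySem.List.pyGetD factor t 0)
        PySem.Set.add acc (PySem.List.sorted (multiplied ++ rest) (fun v => v) false)) acc) acc)
    PySem.Set.empty

-- the inner `while True` loop: check every tuple, else replace the set by up_factor(set);
-- break (false) on the empty set.  The set empties after at most len(factorize N) rounds,
-- so the fuel passed by outerA is never exhausted.  Returning N is returning true here.
def innerA (k : Int) : Nat → PySem.Set (List Int) → Bool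
  | 0, _ => false
  | fuel + 1, factors_set =>
    if factors_set.any (fun factors =>
        factors.foldl (· * ·) 1 == factors.foldl (· + ·) 0 + (k - (factors.length : Int))) then
      true
    else
      let fs := up_factor factors_set
      if fs.isEmpty then false else innerA k fuel fs

-- the outer `while True` loop over N = k, k+1, …  (fuel guard only: Python always
-- returns; the 0 branch is never reached for the fuel get_smallest_N passes)
def outerA (k : Int) : Nat → Int → Int
  | 0, _ => 0
  | fuel + 1, N =>
    let factors_set : PySem.Set (List Int) := PySem.Set.add PySem.Set.empty (factorize N)
    if innerA k ((factorize N).length + 1) factors_set then N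
    else outerA k fuel (N + 1)

def get_smallest_N (k : Int) : Int := outerA k (k.toNat + 2) k

-- ===== PORT B =====

mutual
-- _search(m, f, d) of Source B.  The `f ≤ 1` guard in the loop only makes the recursion
-- total: Source B calls it with f ≥ 2 exclusively (Python would recurse forever at f = 1).
def searchB (m f d : Int) : Bool :=
  if m = 1 then d == 0
  else if d == m - 1 && f ≤ m then true
  else searchLoopB m f d
termination_by (m.toNat, ((m + 1 - f).toNat + 1 : Nat))

-- the `while a * a <= m` loop of _search
def searchLoopB (m a d : Int) : Bool :=
  if a ≤ 1 then false
  else if a * a ≤ m then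
    (if PySem.Int.mod m a == 0 && searchB (PySem.Int.floordiv m a) a (d - (a - 1)) then true
     else searchLoopB m (a + 1) d)
  else false
termination_by (m.toNat, (m + 1 - a).toNat)
decreasing_by
  · have ha : (2:Int) ≤ a := by omega
    have hm : (4:Int) ≤ m := by nlinarith
    rw [PySem.Int.floordiv_eq_ediv_of_pos (by omega)]
    have hlt : m / a < m := by
      rw [Int.ediv_lt_iff_lt_mul (by omega)]
      nlinarith
    have hge : 0 ≤ m / a := Int.ediv_nonneg (by omega) (by omega)
    apply Prod.Lex.left
    omega
  · have ha : (2:Int) ≤ a := by omega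
    have hm : (4:Int) ≤ m := by nlinarith
    have ham : a ≤ m := by nlinarith
    apply Prod.Lex.right
    omega
end

-- the outer `while not _search(...)` loop of Source B (same fuel guard as outerA)
def outerB (k : Int) : Nat → Int → Int
  | 0, _ => 0
  | fuel + 1, N => if searchB N 2 (N - k) then N else outerB k fuel (N + 1)

def get_smallest_N_alt (k : Int) : Int := outerB k (k.toNat + 2) k

-- ===== PRECONDITION & SPEC =====
-- Pre_ excludes k ≤ 0: there Python A raises TypeError (factorize returns None and
-- get_smallest_N iterates over it) and B's search loops without ever succeeding.
def Pre_get_smallest_N (k : Int) : Prop := 1 ≤ k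
instance (k : Int) : Decidable (Pre_get_smallest_N k) := by unfold Pre_get_smallest_N; infer_instance
def pvWitness_get_smallest_N : Int := 5

def Spec_get_smallest_N (k : Int) (out : Int) : Prop := out = get_smallest_N_alt k
instance (k : Int) (out : Int) : Decidable (Spec_get_smallest_N k out) := by unfold Spec_get_smallest_N; infer_instance

-- ===== CLAIM (what is proved, stated in full; the proofs are below) =====
def Claim_equal_get_smallest_N : Prop := ∀ (k : Int), Dom_get_smallest_N k → Pre_get_smallest_N k → Spec_get_smallest_N k (get_smallest_N k)

-- ===== LEMMAS AND PROOFS =====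


def RepP (m f d : Int) : Prop :=
  ∃ g : List Int, List.Pairwise (· ≤ ·) g ∧ (∀ x ∈ g, f ≤ x) ∧ g.prod = m ∧
    (g.sum : Int) - (g.length : Int) = d

theorem prod_ge_of_mem {g : List Int} {c : Int} (hc : 1 ≤ c) (hall : ∀ x ∈ g, c ≤ x)
    (hne : g ≠ []) : c ≤ g.prod := by
  induction g with
  | nil => exact absurd rfl hne
  | cons y t ih =>
    rcases List.eq_nil_or_concat t with h | _
    · subst h; simpa using hall y (by simp)
    · have ht : c ≤ t.prod := ih (fun x hx => hall x (by simp [hx])) (by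
        rintro rfl; simp_all)
      have hy : c ≤ y := hall y (by simp)
      calc c = 1 * c := by ring
        _ ≤ y * t.prod := by apply mul_le_mul (by omega) ht (by omega) (by omega)
        _ = (y :: t).prod := by simp

-- a representation with ≥ 2 factors all ≥ a has a*a ≤ product
theorem sq_le_of_multi {g : List Int} {a : Int} (ha : 1 ≤ a) (hall : ∀ x ∈ g, a ≤ x)
    (hlen : 2 ≤ g.length) : a * a ≤ g.prod := by
  obtain ⟨y, t, rfl⟩ : ∃ y t, g = y :: t := by
    cases g with
    | nil => simp at hlen
    | cons y t => exact ⟨y, t, rfl⟩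
  have htne : t ≠ [] := by rintro rfl; simp at hlen
  by_cases True
  all_goals {
    have ht : a ≤ t.prod := prod_ge_of_mem ha (fun x hx => hall x (by simp [hx])) htne
    have hy : a ≤ y := hall y (by simp)
    calc a * a ≤ y * t.prod := mul_le_mul hy ht (by omega) (by omega)
      _ = (y :: t).prod := by simp }

theorem searchLoopB_iff (m : Int) (hm : 2 ≤ m)
    (IH : ∀ m' : Int, m'.toNat < m.toNat → ∀ f d, 1 ≤ m' → 2 ≤ f →
      (searchB m' f d = true ↔ RepP m' f d)) :
    ∀ (n : Nat) (a d : Int), (m + 1 - a).toNat ≤ n → 2 ≤ a →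
      (searchLoopB m a d = true ↔
        ∃ g : List Int, List.Pairwise (· ≤ ·) g ∧ (∀ x ∈ g, a ≤ x) ∧ g.prod = m ∧
          (g.sum : Int) - (g.length : Int) = d ∧ 2 ≤ g.length) := by
  intro n
  induction n with
  | zero =>
    intro a d hn ha
    have ham : m < a := by omega
    rw [searchLoopB]
    have hsq : ¬ (a * a ≤ m) := by nlinarith
    simp only [if_neg (by omega : ¬ a ≤ 1), if_neg hsq]
    constructor
    · intro h; exact absurd h (by simp)
    · rintro ⟨g, hs, hall, hprod, hd, hlen⟩
      exact absurd (hprod ▸ sq_le_of_multi (by omega) hall hlen) hsq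
  | succ n ihn =>
    intro a d hn ha
    rw [searchLoopB]
    simp only [if_neg (by omega : ¬ a ≤ 1)]
    by_cases hsq : a * a ≤ m
    · have ham : a ≤ m := by nlinarith
      simp only [if_pos hsq]
      have hrec : (m + 1 - (a + 1)).toNat ≤ n := by omega
      by_cases hc : (PySem.Int.mod m a == 0 &&
          searchB (PySem.Int.floordiv m a) a (d - (a - 1))) = true
      · simp only [hc, if_pos]
        refine ⟨fun _ => ?_, fun _ => by trivial⟩
        · rw [Bool.and_eq_true] at hc
          have hdvd : a ∣ m := (PySem.Int.mod_eq_zero_iff_dvd m a).mp (by simpa using hc.1)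
          have hq1 : 1 ≤ PySem.Int.floordiv m a := by
            rw [PySem.Int.floordiv_eq_ediv_of_pos (by omega)]
            exact Int.le_ediv_iff_mul_le (by omega) |>.mpr (by omega)
          have hqlt : (PySem.Int.floordiv m a).toNat < m.toNat := by
            rw [PySem.Int.floordiv_eq_ediv_of_pos (by omega)]
            have : m / a < m := by rw [Int.ediv_lt_iff_lt_mul (by omega)]; nlinarith
            have h0 : 0 ≤ m / a := Int.ediv_nonneg (by omega) (by omega)
            omega
          obtain ⟨g', hs, hall, hprod, hd⟩ :=
            (IH _ hqlt a (d - (a - 1)) hq1 ha).mp hc.2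
          have hg'ne : g' ≠ [] := by
            rintro rfl
            simp only [List.prod_nil] at hprod
            have hma : m = a := by
              have := Int.ediv_mul_cancel hdvd
              rw [PySem.Int.floordiv_eq_ediv_of_pos (by omega)] at hprod
              nlinarith [Int.ediv_mul_cancel hdvd]
            nlinarith
          refine ⟨a :: g', ?_, ?_, ?_, ?_, by
            simp only [List.length_cons]
            have := List.length_pos_iff.mpr hg'ne
            omega⟩
          · exact List.pairwise_cons.mpr ⟨hall, hs⟩
          · intro x hx; rcases hx with _ | hx
            · omega
            · exact hall x (by assumption)
          · rw [List.prod_cons, hprod, PySem.Int.floordiv_eq_ediv_of_pos (by omega),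
              Int.mul_ediv_cancel' hdvd]
          · simp only [List.sum_cons, List.length_cons]
            push_cast
            omega
      · simp only [hc, if_neg, Bool.false_eq_true, not_false_eq_true]
        rw [ihn (a + 1) d hrec (by omega)]
        constructor
        · rintro ⟨g, hs, hall, hprod, hd, hlen⟩
          exact ⟨g, hs, fun x hx => (by have := hall x hx; omega), hprod, hd, hlen⟩
        · rintro ⟨g, hs, hall, hprod, hd, hlen⟩
          obtain ⟨x, t, rfl⟩ : ∃ x t, g = x :: t := by
            cases g with
            | nil => simp at hlen
            | cons x t => exact ⟨x, t, rfl⟩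
          have hxa : a ≤ x := hall x (by simp)
          have hxt : ∀ y ∈ t, x ≤ y := (List.pairwise_cons.mp hs).1
          rcases eq_or_lt_of_le hxa with heq | hlt
          · -- x = a: the divisor branch would have succeeded, contradiction with hc
            exfalso; apply hc
            rw [← heq] at hxt hprod hd hs
            have hdvd : a ∣ m := hprod ▸ Dvd.intro _ rfl
            rw [Bool.and_eq_true]
            constructor
            · simpa using (PySem.Int.mod_eq_zero_iff_dvd m a).mpr hdvd
            · have hqeq : PySem.Int.floordiv m a = t.prod := by
                rw [PySem.Int.floordiv_eq_ediv_of_pos (by omega), ← hprod,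
                  List.prod_cons, Int.mul_ediv_cancel_left _ (by omega)]
              have hq1 : 1 ≤ PySem.Int.floordiv m a := by
                rw [hqeq]
                rcases List.eq_nil_or_concat t with h | _
                · subst h; simp
                · exact le_trans (by omega) (prod_ge_of_mem (by omega)
                    (fun y hy => hxt y hy) (by rintro rfl; simp_all))
              have hqlt : (PySem.Int.floordiv m a).toNat < m.toNat := by
                rw [PySem.Int.floordiv_eq_ediv_of_pos (by omega)]
                have : m / a < m := by rw [Int.ediv_lt_iff_lt_mul (by omega)]; nlinarith
                have h0 : 0 ≤ m / a := Int.ediv_nonneg (by omega) (by omega)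
                omega
              rw [IH _ hqlt a (d - (a - 1)) hq1 (by omega)]
              refine ⟨t, (List.pairwise_cons.mp hs).2, hxt, hqeq.symm, ?_⟩
              simp only [List.sum_cons, List.length_cons] at hd
              push_cast at hd ⊢
              omega
          · refine ⟨x :: t, hs, ?_, hprod, hd, hlen⟩
            intro y hy
            rcases hy with _ | hy
            · omega
            · have := hxt y (by assumption); omega
    · simp only [if_neg hsq]
      constructor
      · intro h; exact absurd h (by simp)
      · rintro ⟨g, hs, hall, hprod, hd, hlen⟩
        exact absurd (hprod ▸ sq_le_of_multi (by omega) hall hlen) hsq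

theorem searchB_iff_aux : ∀ (n : Nat) (m f d : Int), m.toNat ≤ n → 1 ≤ m → 2 ≤ f →
    (searchB m f d = true ↔ RepP m f d) := by
  intro n
  induction n with
  | zero => intro m f d hn hm; omega
  | succ n ihn =>
    intro m f d hn hm hf
    by_cases hm1 : m = 1
    · subst hm1
      rw [searchB]
      simp only [if_pos trivial, show ((d == 0) = true) ↔ d = 0 from by simp]
      constructor
      · intro h
        exact ⟨[], by simp, by simp, by simp, by simp [h]⟩
      · rintro ⟨g, hs, hall, hprod, hd⟩
        have hg : g = [] := by
          by_contra hne
          have := prod_ge_of_mem (c := 2) (by omega) (fun x hx => le_trans hf (hall x hx)) hne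
          omega
        subst hg; simp at hd; simp [← hd]
    · have hm2 : 2 ≤ m := by omega
      rw [searchB]
      simp only [if_neg hm1]
      have IH : ∀ m' : Int, m'.toNat < m.toNat → ∀ f' d', 1 ≤ m' → 2 ≤ f' →
          (searchB m' f' d' = true ↔ RepP m' f' d') := by
        intro m' hlt f' d' h1 h2
        exact ihn m' f' d' (by omega) h1 h2
      by_cases hc : (d == m - 1 && decide (f ≤ m)) = true
      · simp only [hc, if_pos]
        rw [Bool.and_eq_true] at hc
        have hd : d = m - 1 := by simpa using hc.1
        have hfm : f ≤ m := of_decide_eq_true hc.2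
        constructor
        · intro _
          exact ⟨[m], by simp, by simpa using hfm, by simp, by simp; omega⟩
        · intro _; trivial
      · simp only [hc, if_neg, Bool.false_eq_true, not_false_eq_true]
        rw [searchLoopB_iff m hm2 IH (m + 1 - f).toNat f d le_rfl hf]
        constructor
        · rintro ⟨g, hs, hall, hprod, hd, _⟩
          exact ⟨g, hs, hall, hprod, hd⟩
        · rintro ⟨g, hs, hall, hprod, hd⟩
          have hgne : g ≠ [] := by
            rintro rfl; simp at hprod; omega
          obtain ⟨x, t, rfl⟩ : ∃ x t, g = x :: t := by
            cases g with
            | nil => exact absurd rfl hgne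
            | cons x t => exact ⟨x, t, rfl⟩
          cases t with
          | nil =>
            exfalso; apply hc
            simp only [List.prod_cons, List.prod_nil, mul_one] at hprod
            simp only [List.sum_cons, List.sum_nil, List.length_cons, List.length_nil] at hd
            subst hprod
            rw [Bool.and_eq_true]
            refine ⟨by simpa using (by omega : d = x - 1), by simpa using hall x (by simp)⟩
          | cons y t' =>
            exact ⟨x :: y :: t', hs, hall, hprod, hd, by simp⟩

theorem searchB_iff' (m f d : Int) (hm : 1 ≤ m) (hf : 2 ≤ f) :
    searchB m f d = true ↔ RepP m f d :=
  searchB_iff_aux m.toNat m f d le_rfl hm hf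

-- ===== A-side proof layer =====

def Factp (N : Int) (g : List Int) : Prop :=
  List.Pairwise (· ≤ ·) g ∧ (∀ x ∈ g, 2 ≤ x) ∧ g.prod = N

def wOmega (n : Int) : Nat := (Nat.primeFactorsList n.toNat).length

theorem find?_pyRange_eq_some {p : Int → Bool} {x : Int} :
    ∀ (n : Nat) (a : Int), (x - a).toNat ≤ n → a ≤ x → ∀ b : Int, x < b → p x = true →
    (∀ y, a ≤ y → y < x → p y = false) →
    (PySem.List.pyRange a b 1).find? p = some x := by
  intro n
  induction n with
  | zero =>
    intro a hn hax b hxb hpx hmin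
    have : a = x := by omega
    subst this
    rw [PySem.List.pyRange_one_cons (by omega), List.find?_cons_of_pos hpx]
  | succ n ihn =>
    intro a hn hax b hxb hpx hmin
    rcases eq_or_lt_of_le hax with rfl | hlt
    · rw [PySem.List.pyRange_one_cons (by omega), List.find?_cons_of_pos hpx]
    · rw [PySem.List.pyRange_one_cons (by omega),
        List.find?_cons_of_neg (by simp [hmin a le_rfl hlt])]
      exact ihn (a + 1) (by omega) (by omega) b hxb hpx (fun y h1 h2 => hmin y (by omega) h2)

theorem factorize_eq_aux : ∀ (nn : Nat) (n : Int), n.toNat ≤ nn → 1 ≤ n →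
    factorize n = (Nat.primeFactorsList n.toNat).map (Nat.cast : Nat → Int) := by
  intro nn
  induction nn with
  | zero => intro n h1 h2; omega
  | succ nn ihn =>
    intro n h1 h2
    rcases eq_or_lt_of_le h2 with rfl | hn2
    · rw [factorize]; simp
    · have hn2' : 2 ≤ n := by omega
      obtain ⟨kk, hkk⟩ : ∃ kk, n.toNat = kk + 2 := ⟨n.toNat - 2, by omega⟩
      have hmfd := Nat.minFac_dvd n.toNat
      have hmf2 : 2 ≤ n.toNat.minFac := (Nat.minFac_prime (by omega)).two_le
      have hmfle : n.toNat.minFac ≤ n.toNat := Nat.minFac_le (by omega)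
      have hncast : ((n.toNat : Int)) = n := by omega
      have hfind : (PySem.List.pyRange 2 (n + 1) 1).find?
          (fun i => PySem.Int.mod n i == 0) = some ((n.toNat.minFac : Nat) : Int) := by
        apply find?_pyRange_eq_some (((n.toNat.minFac : Int)) - 2).toNat _ le_rfl
          (by exact_mod_cast hmf2) _ (by omega)
        · simp only [beq_iff_eq]
          rw [PySem.Int.mod_eq_zero_iff_dvd, ← hncast]
          exact_mod_cast hmfd
        · intro y hy1 hy2
          rw [Bool.eq_false_iff]
          simp only [ne_eq, beq_iff_eq]
          intro hmod
          rw [PySem.Int.mod_eq_zero_iff_dvd, ← hncast] at hmod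
          have hyd : y.toNat ∣ n.toNat := by
            have : ((y.toNat : Int)) = y := by omega
            rw [← this] at hmod
            exact_mod_cast hmod
          have := Nat.minFac_le_of_dvd (by omega) hyd
          omega
      rw [factorize, if_neg (by omega)]
      split
      case h_2 h => rw [hfind] at h; exact absurd h (by simp)
      case h_1 i h =>
        rw [hfind] at h
        injection h with h
        subst h
        simp only [hkk, Nat.primeFactorsList]
        rw [← hkk]
        congr 1
        have hquot : PySem.Int.floordiv n ((n.toNat.minFac : Nat) : Int) =
            ((n.toNat / n.toNat.minFac : Nat) : Int) := by
          rw [← hncast]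
          exact PySem.Int.floordiv_natCast _ _
        rw [hquot, ihn _ (by
            rw [Int.toNat_natCast]
            have := Nat.div_lt_self (by omega : 0 < n.toNat) (by omega : 1 < n.toNat.minFac)
            omega)
          (by exact_mod_cast Nat.one_le_div_iff (by omega) |>.mpr hmfle)]
        rw [Int.toNat_natCast, hkk]

theorem factorize_eq (n : Int) (hn : 1 ≤ n) :
    factorize n = (Nat.primeFactorsList n.toNat).map (Nat.cast : Nat → Int) :=
  factorize_eq_aux n.toNat n le_rfl hn

theorem one_le_prod {g : List Int} (h : ∀ x ∈ g, 1 ≤ x) : 1 ≤ g.prod := by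
  induction g with
  | nil => simp
  | cons y t ih =>
    have := h y (by simp)
    have ht := ih (fun x hx => h x (by simp [hx]))
    simp only [List.prod_cons]
    nlinarith

theorem factp_factorize (n : Int) (hn : 1 ≤ n) : Factp n (factorize n) := by
  rw [factorize_eq n hn]
  refine ⟨?_, ?_, ?_⟩
  · rw [List.pairwise_map]
    exact ((Nat.primeFactorsList_sorted n.toNat).pairwise).imp (fun hab => by exact_mod_cast hab)
  · intro x hx
    obtain ⟨p, hp, rfl⟩ := List.mem_map.mp hx
    exact_mod_cast (Nat.prime_of_mem_primeFactorsList hp).two_le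
  · rw [← Nat.cast_list_prod, Nat.prod_primeFactorsList (by omega)]
    omega

theorem length_factorize (n : Int) (hn : 1 ≤ n) : (factorize n).length = wOmega n := by
  rw [factorize_eq n hn]; simp [wOmega]

theorem wOmega_mul {a b : Int} (ha : 1 ≤ a) (hb : 1 ≤ b) :
    wOmega (a * b) = wOmega a + wOmega b := by
  have h1 : (a * b).toNat = a.toNat * b.toNat := by
    rcases Int.eq_ofNat_of_zero_le (by omega : (0:Int) ≤ a) with ⟨A, rfl⟩
    rcases Int.eq_ofNat_of_zero_le (by omega : (0:Int) ≤ b) with ⟨B, rfl⟩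
    rw [← Int.natCast_mul]
    exact Int.toNat_natCast _
  unfold wOmega
  rw [h1, (Nat.perm_primeFactorsList_mul (by omega) (by omega)).length_eq, List.length_append]

theorem wOmega_one_le {x : Int} (hx : 2 ≤ x) : 1 ≤ wOmega x := by
  unfold wOmega
  obtain ⟨kk, hkk⟩ : ∃ kk, x.toNat = kk + 2 := ⟨x.toNat - 2, by omega⟩
  rw [hkk, Nat.primeFactorsList]
  simp

theorem wOmega_eq_zero {x : Int} (hx : x ≤ 1) : wOmega x = 0 := by
  unfold wOmega
  rcases (by omega : x.toNat = 0 ∨ x.toNat = 1) with h | h <;> simp [h]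

theorem weight_eq {g : List Int} (hall : ∀ x ∈ g, 2 ≤ x) :
    wOmega g.prod = (g.map wOmega).sum := by
  induction g with
  | nil => simp [wOmega_eq_zero]
  | cons y t ih =>
    have hy := hall y (by simp)
    have ht : 1 ≤ t.prod := one_le_prod (fun x hx => by have := hall x (by simp [hx]); omega)
    simp only [List.prod_cons, List.map_cons, List.sum_cons]
    rw [wOmega_mul (by omega) ht, ih (fun x hx => hall x (by simp [hx]))]

theorem length_le_weight {g : List Int} (hall : ∀ x ∈ g, 2 ≤ x) :
    g.length ≤ (g.map wOmega).sum := by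
  induction g with
  | nil => simp
  | cons y t ih =>
    have := wOmega_one_le (hall y (by simp))
    have := ih (fun x hx => hall x (by simp [hx]))
    simp only [List.length_cons, List.map_cons, List.sum_cons]
    omega

theorem prime_of_wOmega_one {x : Int} (hx : 2 ≤ x) (h1 : wOmega x = 1) : x.toNat.Prime := by
  unfold wOmega at h1
  obtain ⟨p, hp⟩ := List.length_eq_one_iff.mp h1
  have hprod := Nat.prod_primeFactorsList (show x.toNat ≠ 0 by omega)
  have hpm : p ∈ x.toNat.primeFactorsList := by simp [hp]
  have hpp := Nat.prime_of_mem_primeFactorsList hpm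
  rw [hp] at hprod
  simp at hprod
  rwa [← hprod]

theorem all_eq_one_of_sum_le {l : List Nat} (h1 : ∀ x ∈ l, 1 ≤ x) (h2 : l.sum ≤ l.length) :
    ∀ x ∈ l, x = 1 := by
  induction l with
  | nil => simp
  | cons y t ih =>
    have hy := h1 y (by simp)
    have hts : t.length ≤ t.sum := by
      have : ∀ x ∈ t, 1 ≤ x := fun x hx => h1 x (by simp [hx])
      clear ih h2 h1 hy
      induction t with
      | nil => simp
      | cons z s ihs =>
        have hz := this z (by simp)
        have := ihs (fun x hx => this x (by simp [hx]))
        simp only [List.sum_cons, List.length_cons]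
        omega
    simp only [List.sum_cons, List.length_cons] at h2
    intro x hx
    rcases List.mem_cons.mp hx with rfl | hxt
    · omega
    · exact ih (fun z hz => h1 z (by simp [hz])) (by omega) x hxt

theorem prod_toNat {g : List Int} (h : ∀ x ∈ g, 0 ≤ x) :
    (g.map Int.toNat).prod = g.prod.toNat := by
  induction g with
  | nil => simp
  | cons y t ih =>
    have hy := h y (by simp)
    have ht : 0 ≤ t.prod := List.prod_nonneg (fun x hx => h x (by simp [hx]))
    simp only [List.map_cons, List.prod_cons, ih (fun x hx => h x (by simp [hx]))]
    rcases Int.eq_ofNat_of_zero_le hy with ⟨A, rfl⟩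
    rcases Int.eq_ofNat_of_zero_le ht with ⟨B, hB⟩
    rw [hB, ← Int.natCast_mul]
    exact (Int.toNat_natCast _).symm

theorem factp_unique {N : Int} (hN : 1 ≤ N) {g : List Int} (hf : Factp N g)
    (hlen : g.length = wOmega N) : g = factorize N := by
  obtain ⟨hs, hall, hprod⟩ := hf
  have hw : (g.map wOmega).sum = wOmega N := by rw [← weight_eq hall, hprod]
  have hones : ∀ x ∈ g, wOmega x = 1 := by
    have h1 : ∀ w ∈ g.map wOmega, 1 ≤ w := by
      intro w hw'
      obtain ⟨x, hx, rfl⟩ := List.mem_map.mp hw'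
      exact wOmega_one_le (hall x hx)
    have h2 : (g.map wOmega).sum ≤ (g.map wOmega).length := by
      rw [List.length_map, hlen, hw]
    intro x hx
    exact all_eq_one_of_sum_le h1 h2 _ (List.mem_map_of_mem hx)
  have hprime : ∀ p ∈ g.map Int.toNat, p.Prime := by
    intro p hp
    obtain ⟨x, hx, rfl⟩ := List.mem_map.mp hp
    exact prime_of_wOmega_one (hall x hx) (hones x hx)
  have hProdNat : (g.map Int.toNat).prod = N.toNat := by
    rw [prod_toNat (fun x hx => by have := hall x hx; omega), hprod]
  have hperm := Nat.primeFactorsList_unique hProdNat hprime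
  have hsortNat : (g.map Int.toNat).Pairwise (· ≤ ·) := by
    rw [List.pairwise_map]
    exact hs.imp (fun hab => Int.toNat_le_toNat hab)
  have heq := List.Perm.eq_of_pairwise' hsortNat
    ((Nat.primeFactorsList_sorted N.toNat).pairwise) hperm
  calc g = (g.map Int.toNat).map (Nat.cast : Nat → Int) := by
        rw [List.map_map]
        conv_lhs => rw [← List.map_id g]
        apply List.map_congr_left
        intro x hx
        have := hall x hx
        simp only [Function.comp_apply, id_eq]
        omega
    _ = (N.toNat.primeFactorsList).map (Nat.cast : Nat → Int) := by rw [heq]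
    _ = factorize N := (factorize_eq N hN).symm

theorem mem_foldl_step {α β : Type} [BEq α] [LawfulBEq α]
    (step : PySem.Set α → β → PySem.Set α) (P : β → α → Prop)
    (hstep : ∀ s b y, y ∈ step s b ↔ y ∈ s ∨ P b y) :
    ∀ (l : List β) (s : PySem.Set α) (y : α),
      y ∈ l.foldl step s ↔ y ∈ s ∨ ∃ b ∈ l, P b y := by
  intro l
  induction l with
  | nil => simp
  | cons b t ih =>
    intro s y
    simp only [List.foldl_cons]
    rw [ih, hstep]
    simp only [List.mem_cons]
    constructor
    · rintro ((h | h) | ⟨b', hb', h⟩)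
      · exact Or.inl h
      · exact Or.inr ⟨b, Or.inl rfl, h⟩
      · exact Or.inr ⟨b', Or.inr hb', h⟩
    · rintro (h | ⟨b', (rfl | hb'), h⟩)
      · exact Or.inl (Or.inl h)
      · exact Or.inl (Or.inr h)
      · exact Or.inr ⟨b', hb', h⟩

def mergeAt (factor : List Int) (L i j : Int) : List Int :=
  PySem.List.sorted ([PySem.List.pyGetD factor i 0 * PySem.List.pyGetD factor j 0] ++
    ((PySem.List.pyRange 0 L 1).filter (fun t => !(t == i) && !(t == j))).map
      (fun t => PySem.List.pyGetD factor t 0)) (fun v => v) false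

theorem mem_up_factor (S : PySem.Set (List Int)) (y : List Int) :
    y ∈ up_factor S ↔ ∃ f ∈ S,
      ∃ i ∈ PySem.List.pyRange 1 ((S.headD []).length : Int) 1,
        ∃ j ∈ PySem.List.pyRange 0 i 1, y = mergeAt f ((S.headD []).length : Int) i j := by
  have h := mem_foldl_step
    (fun acc factor =>
      (PySem.List.pyRange 1 ((S.headD []).length : Int) 1).foldl (fun acc i =>
        (PySem.List.pyRange 0 i 1).foldl (fun acc j =>
          PySem.Set.add acc (mergeAt factor ((S.headD []).length : Int) i j)) acc) acc)
    (fun factor y => ∃ i ∈ PySem.List.pyRange 1 ((S.headD []).length : Int) 1,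
        ∃ j ∈ PySem.List.pyRange 0 i 1, y = mergeAt factor ((S.headD []).length : Int) i j)
    (fun s factor y => by
      apply Iff.trans (mem_foldl_step
        (fun acc i => (PySem.List.pyRange 0 i 1).foldl (fun acc j =>
          PySem.Set.add acc (mergeAt factor ((S.headD []).length : Int) i j)) acc)
        (fun i y => ∃ j ∈ PySem.List.pyRange 0 i 1,
          y = mergeAt factor ((S.headD []).length : Int) i j)
        (fun s i y => by
          apply Iff.trans (mem_foldl_step
            (fun acc j => PySem.Set.add acc (mergeAt factor ((S.headD []).length : Int) i j))
            (fun j y => y = mergeAt factor ((S.headD []).length : Int) i j)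
            (fun s j y => PySem.Set.mem_add s _ y) _ s y)
          exact Iff.rfl) _ s y)
      exact Iff.rfl)
    S PySem.Set.empty y
  refine Iff.trans ?_ (h.trans (by simp [PySem.Set.empty]))
  unfold up_factor mergeAt
  exact Iff.rfl

theorem map_pyGetD_seg (f : List Int) : ∀ (n : Nat) (a b : Nat), b - a = n → b ≤ f.length →
    (PySem.List.pyRange (a : Int) (b : Int) 1).map (fun t => PySem.List.pyGetD f t 0) =
      (f.drop a).take (b - a) := by
  intro n
  induction n with
  | zero =>
    intro a b h hb
    rw [PySem.List.pyRange_one_eq_nil (by omega)]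
    simp [h]
  | succ n ih =>
    intro a b h hb
    rw [PySem.List.pyRange_one_cons (by omega)]
    simp only [List.map_cons]
    have ha : a < f.length := by omega
    have h1 : PySem.List.pyGetD f (a : Int) 0 = f[a] := by
      rw [PySem.List.pyGetD_natCast]
      exact List.getD_eq_getElem f 0 ha
    have h2 : ((a : Int) + 1) = ((a + 1 : Nat) : Int) := by push_cast; ring
    rw [h1, h2, ih (a+1) b (by omega) hb,
      show b - a = (b - (a+1)) + 1 by omega, List.drop_eq_getElem_cons ha,
      List.take_succ_cons]

theorem filter_pyRange_true {i j a b : Int} (h : b ≤ j ∨ (j < a ∧ b ≤ i) ∨ i < a) (hji : j < i) :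
    (PySem.List.pyRange a b 1).filter (fun t => !(t == i) && !(t == j)) =
      PySem.List.pyRange a b 1 := by
  apply List.filter_eq_self.mpr
  intro t ht
  rw [PySem.List.mem_pyRange_one] at ht
  simp only [Bool.and_eq_true, Bool.not_eq_eq_eq_not, Bool.not_true, beq_eq_false_iff_ne]
  omega

theorem filter_singleton_false {i j x : Int} (h : x = i ∨ x = j) :
    [x].filter (fun t => !(t == i) && !(t == j)) = [] := by
  rcases h with rfl | rfl <;> simp

theorem map_pyGetD_seg' (f : List Int) (b : Nat) (hb : b ≤ f.length) :
    (PySem.List.pyRange 0 (b : Int) 1).map (fun t => PySem.List.pyGetD f t 0) = f.take b := by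
  have h := map_pyGetD_seg f b 0 b rfl hb
  rw [show (((0:Nat)) : Int) = (0:Int) from by simp] at h
  simpa using h

theorem rest_eq (f : List Int) (i j : Nat) (hj : j < i) (hi : i < f.length) :
    ((PySem.List.pyRange 0 (f.length : Int) 1).filter
        (fun t => !(t == (i : Int)) && !(t == (j : Int)))).map
      (fun t => PySem.List.pyGetD f t 0) =
      (f.eraseIdx i).eraseIdx j := by
  rw [PySem.List.pyRange_one_append 0 ((i:Int)+1) (f.length:Int) (by omega) (by omega),
    PySem.List.pyRange_one_append 0 (i:Int) ((i:Int)+1) (by omega) (by omega),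
    PySem.List.pyRange_one_append 0 ((j:Int)+1) (i:Int) (by omega) (by omega),
    PySem.List.pyRange_one_append 0 (j:Int) ((j:Int)+1) (by omega) (by omega)]
  simp only [List.filter_append, List.map_append]
  rw [PySem.List.pyRange_one_singleton, PySem.List.pyRange_one_singleton]
  rw [filter_singleton_false (i := (i:Int)) (j := (j:Int)) (Or.inr rfl),
      filter_singleton_false (i := (i:Int)) (j := (j:Int)) (Or.inl rfl)]
  rw [filter_pyRange_true (i := (i:Int)) (j := (j:Int)) (by omega) (by omega),
      filter_pyRange_true (i := (i:Int)) (j := (j:Int)) (by omega) (by omega),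
      filter_pyRange_true (i := (i:Int)) (j := (j:Int)) (by omega) (by omega)]
  simp only [List.map_nil, List.append_nil]
  rw [map_pyGetD_seg' f j (by omega)]
  rw [show ((j:Int)+1) = ((j+1 : Nat) : Int) from by push_cast; ring,
    map_pyGetD_seg f (i - (j+1)) (j+1) i (by omega) (by omega)]
  rw [show ((i:Int)+1) = ((i+1 : Nat) : Int) from by push_cast; ring,
    map_pyGetD_seg f (f.length - (i+1)) (i+1) f.length (by omega) (by omega)]
  -- right-hand side
  rw [List.eraseIdx_eq_take_drop_succ f i,
    List.eraseIdx_append_of_lt_length (by rw [List.length_take]; omega),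
    List.eraseIdx_eq_take_drop_succ (f.take i) j,
    List.take_take, List.drop_take,
    Nat.min_eq_left (le_of_lt hj),
    List.take_of_length_le (l := f.drop (i+1)) (i := f.length - (i+1))
      (by rw [List.length_drop])]

theorem cons_eraseIdx_perm (f : List Int) (i : Nat) (hi : i < f.length) :
    f.Perm (f[i] :: f.eraseIdx i) := by
  conv_lhs => rw [← List.take_append_drop i f]
  rw [List.eraseIdx_eq_take_drop_succ, List.drop_eq_getElem_cons hi]
  exact List.perm_middle

theorem eraseIdx_comm (l : List Int) : ∀ (p q : Nat), p ≤ q →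
    (l.eraseIdx (q+1)).eraseIdx p = (l.eraseIdx p).eraseIdx q := by
  induction l with
  | nil => intro p q h; simp
  | cons x t ih =>
    intro p q h
    cases p with
    | zero => simp
    | succ p' =>
      cases q with
      | zero => omega
      | succ q' =>
        simp only [List.eraseIdx_cons_succ]
        rw [ih p' q' (by omega)]

theorem exists_two_idx {f : List Int} {a b : Int} {r : List Int} (hp : f.Perm (a :: b :: r)) :
    ∃ (i j : Nat) (hi : i < f.length) (hj : j < f.length), j < i ∧
      f[i]'hi * f[j]'hj = a * b ∧ ((f.eraseIdx i).eraseIdx j).Perm r := by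
  have ha : a ∈ f := hp.mem_iff.mpr (by simp)
  obtain ⟨i1, hi1, hfi1⟩ := List.mem_iff_getElem.mp ha
  have hp1 : (f.eraseIdx i1).Perm (b :: r) := by
    have h := cons_eraseIdx_perm f i1 hi1
    rw [hfi1] at h
    exact (h.symm.trans hp).cons_inv
  have hb : b ∈ f.eraseIdx i1 := hp1.mem_iff.mpr (by simp)
  obtain ⟨i2, hi2, hfi2⟩ := List.mem_iff_getElem.mp hb
  have hp2 : ((f.eraseIdx i1).eraseIdx i2).Perm r := by
    have h := cons_eraseIdx_perm (f.eraseIdx i1) i2 hi2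
    rw [hfi2] at h
    exact (h.symm.trans hp1).cons_inv
  have hlen : (f.eraseIdx i1).length = f.length - 1 := by
    rw [List.length_eraseIdx_of_lt hi1]
  rcases lt_or_ge i2 i1 with hlt | hge
  · refine ⟨i1, i2, hi1, by omega, hlt, ?_, hp2⟩
    rw [hfi1, show f[i2]'(by omega) = (f.eraseIdx i1)[i2]'hi2 from
      (List.getElem_eraseIdx_of_lt hi2 hlt).symm, hfi2]
  · refine ⟨i2 + 1, i1, by omega, hi1, by omega, ?_, ?_⟩
    · rw [hfi1, show f[i2+1]'(by omega) = (f.eraseIdx i1)[i2]'hi2 from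
        (List.getElem_eraseIdx_of_ge hi2 hge).symm, hfi2]
      ring
    · rw [eraseIdx_comm f i1 i2 hge]
      exact hp2

theorem up_factor_step (N : Int) (L : Nat) (S : PySem.Set (List Int)) (hne : S ≠ [])
    (hmem : ∀ g, g ∈ S ↔ (Factp N g ∧ g.length = L)) :
    ∀ h, h ∈ up_factor S ↔ (Factp N h ∧ h.length + 1 = L ∧ 2 ≤ L) := by
  have hhead : ((S.headD []).length : Int) = (L : Int) := by
    obtain ⟨f0, S', rfl⟩ : ∃ f0 S', S = f0 :: S' := by
      cases S with
      | nil => exact absurd rfl hne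
      | cons f0 S' => exact ⟨f0, S', rfl⟩
    have := (hmem f0).mp (by simp)
    simp [this.2]
  intro h
  rw [mem_up_factor, hhead]
  constructor
  · rintro ⟨f, hfS, i, hi, j, hj, rfl⟩
    obtain ⟨⟨hsort, hall, hprod⟩, hlenf⟩ := (hmem f).mp hfS
    rw [PySem.List.mem_pyRange_one] at hi hj
    have hL2 : 2 ≤ L := by omega
    obtain ⟨iN, rfl⟩ := Int.eq_ofNat_of_zero_le (by omega : (0:Int) ≤ i)
    obtain ⟨jN, rfl⟩ := Int.eq_ofNat_of_zero_le (by omega : (0:Int) ≤ j)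
    have hiN : iN < f.length := by omega
    have hjN : jN < f.length := by omega
    have hji : jN < iN := by exact_mod_cast hj.2
    have hrest : ((PySem.List.pyRange 0 ((L:Nat) : Int) 1).filter
        (fun t => !(t == (iN:Int)) && !(t == (jN:Int)))).map (fun t => PySem.List.pyGetD f t 0)
        = (f.eraseIdx iN).eraseIdx jN := by
      rw [← hlenf]
      exact rest_eq f iN jN hji hiN
    have hgi : PySem.List.pyGetD f (iN : Int) 0 = f[iN] := by
      rw [PySem.List.pyGetD_natCast]; exact List.getD_eq_getElem f 0 hiN
    have hgj : PySem.List.pyGetD f (jN : Int) 0 = f[jN] := by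
      rw [PySem.List.pyGetD_natCast]; exact List.getD_eq_getElem f 0 hjN
    have hmerge : mergeAt f ((L : Nat) : Int) (iN : Int) (jN : Int) =
        PySem.List.sorted ((f[iN] * f[jN]) :: (f.eraseIdx iN).eraseIdx jN) (fun v => v) false := by
      unfold mergeAt
      rw [hrest, hgi, hgj]
      rfl
    rw [hmerge]
    set x := f[iN] * f[jN] with hx
    set rest := (f.eraseIdx iN).eraseIdx jN with hrestdef
    have hperm1 : f.Perm (f[iN] :: f.eraseIdx iN) := cons_eraseIdx_perm f iN hiN
    have hperm2 : (f.eraseIdx iN).Perm (f[jN] :: rest) := by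
      have h2 := cons_eraseIdx_perm (f.eraseIdx iN) jN (by rw [List.length_eraseIdx_of_lt hiN]; omega)
      rwa [List.getElem_eraseIdx_of_lt _ hji] at h2
    have hpermAll : f.Perm (f[iN] :: f[jN] :: rest) := hperm1.trans (hperm2.cons _)
    have hsp := PySem.List.sorted_perm (x :: rest) (fun v => v) false
    refine ⟨⟨?_, ?_, ?_⟩, ?_, hL2⟩
    · have := PySem.List.sorted_pairwise (xs := x :: rest) (key := fun v => v)
      simpa using this
    · intro y hy
      rw [PySem.List.mem_sorted] at hy
      rcases List.mem_cons.mp hy with rfl | hyr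
      · have h1 := hall _ (List.getElem_mem hiN)
        have h2 := hall _ (List.getElem_mem hjN)
        nlinarith
      · have : y ∈ f := by
          have := List.mem_of_mem_eraseIdx (List.mem_of_mem_eraseIdx (hrestdef ▸ hyr))
          exact this
        exact hall y this
    · rw [hsp.prod_eq, List.prod_cons, hx]
      have := hpermAll.prod_eq
      rw [List.prod_cons, List.prod_cons] at this
      rw [← hprod, this]
      ring
    · rw [PySem.List.length_sorted]
      have hl1 : rest.length = f.length - 2 := by
        rw [hrestdef, List.length_eraseIdx_of_lt (by rw [List.length_eraseIdx_of_lt hiN]; omega),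
          List.length_eraseIdx_of_lt hiN]
        omega
      simp only [List.length_cons]
      omega
  · rintro ⟨⟨hsort, hall, hprod⟩, hlen, hL2⟩
    -- h misses one merge: find a composite entry, split it, and merge it back
    obtain ⟨f0, hf0⟩ : ∃ f0, f0 ∈ S := by
      cases S with
      | nil => exact absurd rfl hne
      | cons f0 S' => exact ⟨f0, by simp⟩
    obtain ⟨⟨hs0, ha0, hp0⟩, hl0⟩ := (hmem f0).mp hf0
    have hN : 1 ≤ N := by
      rw [← hp0]; exact one_le_prod (fun x hx => by have := ha0 x hx; omega)
    have hwN : wOmega N = (f0.map wOmega).sum := by rw [← hp0]; exact weight_eq ha0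
    have hLle : L ≤ wOmega N := by rw [hwN, ← hl0]; exact length_le_weight ha0
    have hwh : (h.map wOmega).sum = wOmega N := by rw [← hprod]; exact (weight_eq hall).symm
    obtain ⟨x, hxh, hx2⟩ : ∃ x ∈ h, 2 ≤ wOmega x := by
      by_contra hcon
      push_neg at hcon
      have : (h.map wOmega).sum ≤ h.length := by
        have := List.sum_le_card_nsmul (h.map wOmega) 1 (by
          intro w hw
          obtain ⟨y, hy, rfl⟩ := List.mem_map.mp hw
          exact Nat.lt_succ_iff.mp (hcon y hy))
        simpa using this
      omega
    have hx2' : 2 ≤ x := hall x hxh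
    set p : Int := (x.toNat.minFac : Int) with hpdef
    set q : Int := ((x.toNat / x.toNat.minFac : Nat) : Int) with hqdef
    have hmfd := Nat.minFac_dvd x.toNat
    have hp2 : 2 ≤ p := by
      have := (Nat.minFac_prime (show x.toNat ≠ 1 by omega)).two_le
      simp [hpdef]; omega
    have hxpq : x = p * q := by
      rw [hpdef, hqdef, ← Int.natCast_mul, Nat.mul_div_cancel' hmfd]
      omega
    have hwx : wOmega x = 1 + wOmega q := by
      unfold wOmega
      obtain ⟨kk, hkk⟩ : ∃ kk, x.toNat = kk + 2 := ⟨x.toNat - 2, by omega⟩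
      rw [hkk, Nat.primeFactorsList]
      simp only [List.length_cons]
      rw [hqdef, Int.toNat_natCast, hkk]
      omega
    have hq2 : 2 ≤ q := by
      by_contra hcon
      have := wOmega_eq_zero (x := q) (by omega)
      omega
    have hxerase : h.Perm (x :: h.erase x) := List.perm_cons_erase hxh
    set f : List Int := PySem.List.sorted (p :: q :: h.erase x) (fun v => v) false with hfdef
    have hfperm : f.Perm (p :: q :: h.erase x) := PySem.List.sorted_perm _ _ _
    have hfS : f ∈ S := by
      rw [hmem]
      refine ⟨⟨?_, ?_, ?_⟩, ?_⟩
      · have := PySem.List.sorted_pairwise (xs := p :: q :: h.erase x) (key := fun v => v)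
        simpa using this
      · intro y hy
        rw [hfdef, PySem.List.mem_sorted] at hy
        rcases List.mem_cons.mp hy with rfl | hy
        · exact hp2
        rcases List.mem_cons.mp hy with rfl | hy
        · exact hq2
        · exact hall y (List.mem_of_mem_erase hy)
      · rw [hfperm.prod_eq]
        simp only [List.prod_cons]
        rw [← mul_assoc, ← hxpq, ← List.prod_cons, ← hxerase.prod_eq, hprod]
      · rw [hfperm.length_eq]
        simp only [List.length_cons]
        rw [List.length_erase_of_mem hxh]
        omega
    have hflen : f.length = L := ((hmem f).mp hfS).2
    obtain ⟨i, j, hi, hj, hji, hijprod, hijrest⟩ := exists_two_idx hfperm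
    refine ⟨f, hfS, (i : Int), ?_, (j : Int), ?_, ?_⟩
    · rw [PySem.List.mem_pyRange_one]
      constructor
      · exact_mod_cast Nat.one_le_iff_ne_zero.mpr (by omega)
      · exact_mod_cast hflen ▸ hi
    · rw [PySem.List.mem_pyRange_one]
      constructor
      · positivity
      · exact_mod_cast hji
    · have hrest : ((PySem.List.pyRange 0 ((L:Nat) : Int) 1).filter
          (fun t => !(t == (i:Int)) && !(t == (j:Int)))).map (fun t => PySem.List.pyGetD f t 0)
          = (f.eraseIdx i).eraseIdx j := by
        rw [← hflen]
        exact rest_eq f i j hji hi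
      have hgi : PySem.List.pyGetD f (i : Int) 0 = f[i] := by
        rw [PySem.List.pyGetD_natCast]; exact List.getD_eq_getElem f 0 hi
      have hgj : PySem.List.pyGetD f (j : Int) 0 = f[j] := by
        rw [PySem.List.pyGetD_natCast]; exact List.getD_eq_getElem f 0 hj
      have hmerge : mergeAt f ((L : Nat) : Int) (i : Int) (j : Int) =
          PySem.List.sorted ((f[i] * f[j]) :: (f.eraseIdx i).eraseIdx j) (fun v => v) false := by
        unfold mergeAt
        rw [hrest, hgi, hgj]
        rfl
      rw [hmerge, hijprod, ← hxpq]
      symm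
      apply PySem.List.sorted_id_eq_of_perm_of_pairwise
      · exact hxerase.trans (hijrest.symm.cons x)
      · exact hsort

theorem mem_init (N : Int) (hN : 1 ≤ N) (g : List Int) :
    g ∈ PySem.Set.add PySem.Set.empty (factorize N) ↔ (Factp N g ∧ g.length = wOmega N) := by
  have he : PySem.Set.add PySem.Set.empty (factorize N) = [factorize N] := rfl
  rw [he, List.mem_singleton]
  constructor
  · rintro rfl
    exact ⟨factp_factorize N hN, length_factorize N hN⟩
  · rintro ⟨hf, hlen⟩
    exact factp_unique hN hf hlen

theorem any_iff (k : Int) (S : PySem.Set (List Int)) :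
    (S.any (fun factors => factors.foldl (· * ·) 1 == factors.foldl (· + ·) 0 +
      (k - (factors.length : Int))) = true) ↔
      ∃ g ∈ S, g.prod = g.sum + (k - (g.length : Int)) := by
  rw [List.any_eq_true]
  constructor
  · rintro ⟨g, hg, hc⟩
    refine ⟨g, hg, ?_⟩
    rw [List.prod_eq_foldl, List.sum_eq_foldl]
    simpa using hc
  · rintro ⟨g, hg, hc⟩
    refine ⟨g, hg, ?_⟩
    rw [List.prod_eq_foldl, List.sum_eq_foldl] at hc
    simpa using hc

theorem innerA_iff (N k : Int) : ∀ (L : Nat) (fuel : Nat) (S : PySem.Set (List Int)),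
    L < fuel → S ≠ [] → (∀ g, g ∈ S ↔ (Factp N g ∧ g.length = L)) →
    (innerA k fuel S = true ↔
      ∃ g, Factp N g ∧ g.length ≤ L ∧ g.prod = g.sum + (k - (g.length : Int))) := by
  intro L
  induction L with
  | zero =>
    intro fuel S hfuel hne hmem
    obtain ⟨fuel', rfl⟩ : ∃ fuel', fuel = fuel' + 1 := ⟨fuel - 1, by omega⟩
    obtain ⟨f0, hf0⟩ : ∃ f0, f0 ∈ S := by
      cases S with
      | nil => exact absurd rfl hne
      | cons f0 S' => exact ⟨f0, by simp⟩
    obtain ⟨hfp0, hl0⟩ := (hmem f0).mp hf0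
    have hf0nil : f0 = [] := List.length_eq_zero_iff.mp hl0
    subst hf0nil
    have hN1 : N = 1 := by have := hfp0.2.2; simpa using this.symm
    show (if _ then true else _) = true ↔ _
    by_cases hany : (S.any (fun factors => factors.foldl (· * ·) 1 == factors.foldl (· + ·) 0 +
      (k - (factors.length : Int))) = true)
    · rw [if_pos hany]
      obtain ⟨g, hgS, hc⟩ := (any_iff k S).mp hany
      obtain ⟨hfp, hlen⟩ := (hmem g).mp hgS
      simp only [true_iff]
      exact ⟨g, hfp, by omega, hc⟩
    · rw [if_neg hany]
      have hS' : up_factor S = [] := by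
        apply List.eq_nil_iff_forall_not_mem.mpr
        intro h hmem'
        have := (up_factor_step N 0 S hne hmem h).mp hmem'
        omega
      rw [hS']
      simp only [List.isEmpty_nil, if_true]
      constructor
      · intro hcon; exact absurd hcon (by simp)
      · rintro ⟨g, hfp, hlen, hc⟩
        exfalso
        apply hany
        rw [any_iff]
        have hg0 : g = [] := by
          have : g.length = 0 := by omega
          exact List.length_eq_zero_iff.mp this
        subst hg0
        exact ⟨[], hf0, hc⟩
  | succ L' ih =>
    intro fuel S hfuel hne hmem
    obtain ⟨fuel', rfl⟩ : ∃ fuel', fuel = fuel' + 1 := ⟨fuel - 1, by omega⟩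
    obtain ⟨f0, hf0⟩ : ∃ f0, f0 ∈ S := by
      cases S with
      | nil => exact absurd rfl hne
      | cons f0 S' => exact ⟨f0, by simp⟩
    obtain ⟨hfp0, hl0⟩ := (hmem f0).mp hf0
    show (if _ then true else _) = true ↔ _
    by_cases hany : (S.any (fun factors => factors.foldl (· * ·) 1 == factors.foldl (· + ·) 0 +
      (k - (factors.length : Int))) = true)
    · rw [if_pos hany]
      obtain ⟨g, hgS, hc⟩ := (any_iff k S).mp hany
      obtain ⟨hfp, hlen⟩ := (hmem g).mp hgS
      simp only [true_iff]
      exact ⟨g, hfp, by omega, hc⟩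
    · rw [if_neg hany]
      have hnocond : ∀ g, Factp N g → g.length = L' + 1 →
          ¬ (g.prod = g.sum + (k - (g.length : Int))) := by
        intro g hfp hlen hc
        exact hany ((any_iff k S).mpr ⟨g, (hmem g).mpr ⟨hfp, hlen⟩, hc⟩)
      cases L' with
      | zero =>
        have hS' : up_factor S = [] := by
          apply List.eq_nil_iff_forall_not_mem.mpr
          intro h hmem'
          have := (up_factor_step N 1 S hne hmem h).mp hmem'
          omega
        rw [hS']
        simp only [List.isEmpty_nil, if_true]
        constructor
        · intro hcon; exact absurd hcon (by simp)
        · rintro ⟨g, hfp, hlen, hc⟩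
          rcases (by omega : g.length = 1 ∨ g.length = 0) with h1 | h0
          · exact absurd hc (hnocond g hfp h1)
          · have hg0 : g = [] := List.length_eq_zero_iff.mp h0
            subst hg0
            have hN1 : N = 1 := by have := hfp.2.2; simpa using this.symm
            -- but f0 has length 1 and product N = 1 with entries ≥ 2: impossible
            obtain ⟨y, hy⟩ : ∃ y, f0 = [y] := List.length_eq_one_iff.mp hl0
            have h2 := hfp0.2.1 y (by simp [hy])
            have h3 := hfp0.2.2
            rw [hy] at h3
            simp at h3
            omega
      | succ L'' =>
        -- the next set is exactly the factorizations of length L'' + 2 - 1, and is nonempty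
        have hstep := up_factor_step N (L'' + 2) S hne hmem
        have hmem' : ∀ g, g ∈ up_factor S ↔ (Factp N g ∧ g.length = L'' + 1) := by
          intro g
          rw [hstep g]
          constructor
          · rintro ⟨hfp, hlen, _⟩; exact ⟨hfp, by omega⟩
          · rintro ⟨hfp, hlen⟩; exact ⟨hfp, by omega, by omega⟩
        have hne' : up_factor S ≠ [] := by
          obtain ⟨a, b, t, rfl⟩ : ∃ a b t, f0 = a :: b :: t := by
            cases f0 with
            | nil => simp at hl0
            | cons a t0 =>
              cases t0 with
              | nil => simp at hl0
              | cons b t => exact ⟨a, b, t, rfl⟩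
          have hx0 : PySem.List.sorted ((a * b) :: t) (fun v => v) false ∈ up_factor S := by
            rw [hstep]
            have hperm := PySem.List.sorted_perm ((a * b) :: t) (fun v => v) false
            obtain ⟨hs0, ha0, hp0⟩ := hfp0
            refine ⟨⟨?_, ?_, ?_⟩, ?_, by omega⟩
            · have := PySem.List.sorted_pairwise (xs := (a*b) :: t) (key := fun v => v)
              simpa using this
            · intro y hy
              rw [PySem.List.mem_sorted] at hy
              rcases List.mem_cons.mp hy with rfl | hy
              · have h1 := ha0 a (by simp)
                have h2 := ha0 b (by simp)
                nlinarith
              · exact ha0 y (by simp [hy])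
            · rw [hperm.prod_eq]
              simp only [List.prod_cons] at hp0 ⊢
              rw [← hp0]; ring
            · rw [hperm.length_eq]
              simp only [List.length_cons] at hl0 ⊢
              omega
          exact List.ne_nil_of_mem hx0
        rw [if_neg (by simpa [List.isEmpty_iff] using hne')]
        rw [ih fuel' (up_factor S) (by omega) hne' hmem']
        constructor
        · rintro ⟨g, hfp, hlen, hc⟩
          exact ⟨g, hfp, by omega, hc⟩
        · rintro ⟨g, hfp, hlen, hc⟩
          rcases (by omega : g.length ≤ L'' + 1 ∨ g.length = L'' + 2) with h | h
          · exact ⟨g, hfp, h, hc⟩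
          · exact absurd hc (hnocond g hfp h)

theorem checkA_iff (N k : Int) (hN : 1 ≤ N) :
    (innerA k ((factorize N).length + 1) (PySem.Set.add PySem.Set.empty (factorize N)) = true)
      ↔ RepP N 2 (N - k) := by
  rw [length_factorize N hN,
    innerA_iff N k (wOmega N) (wOmega N + 1) _ (by omega) (by simp [PySem.Set.add]) (mem_init N hN)]
  constructor
  · rintro ⟨g, ⟨hs, hall, hprod⟩, hlen, hc⟩
    exact ⟨g, hs, hall, hprod, by omega⟩
  · rintro ⟨g, hs, hall, hprod, hd⟩
    refine ⟨g, ⟨hs, hall, hprod⟩, ?_, by omega⟩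
    have h1 : wOmega N = (g.map wOmega).sum := by rw [← hprod]; exact weight_eq hall
    have h2 := length_le_weight hall
    omega

theorem checkA_eq_checkB (k N : Int) (hN : 1 ≤ N) :
    innerA k ((factorize N).length + 1) (PySem.Set.add PySem.Set.empty (factorize N)) =
      searchB N 2 (N - k) := by
  have hA := checkA_iff N k hN
  have hB := searchB_iff' N 2 (N - k) hN le_rfl
  rw [Bool.eq_iff_iff]
  exact hA.trans hB.symm

theorem outer_eq (k : Int) (fuel : Nat) : ∀ (N : Int), 1 ≤ N →
    outerA k fuel N = outerB k fuel N := by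
  induction fuel with
  | zero => intro N _; rfl
  | succ fuel ih =>
    intro N hN
    show (if innerA k _ _ then N else outerA k fuel (N + 1)) =
      (if searchB N 2 (N - k) then N else outerB k fuel (N + 1))
    rw [checkA_eq_checkB k N hN]
    split
    · rfl
    · exact ih (N + 1) (by omega)



-- ===== VERDICT (by name: the statement is the Claim_ definition above) =====
theorem get_smallest_N_spec : Claim_equal_get_smallest_N := by
  intro k _ hk
  show get_smallest_N k = get_smallest_N_alt k
  exact outer_eq k (k.toNat + 2) k hk
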